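-- pv_equiv track=rewrite | github.com/siva323388/Pusparkandazure | python/lab-solution/Lab 2.py | analyze_word_frequency
-- ===== SOURCE A (Python) =====
-- from collections import Counter, deque
-- import string
--
-- def analyze_word_frequency(text):
--     # Clean text: remove punctuation, convert to lowercase
--     translator = str.maketrans("", "", string.punctuation)
--     clean_text = text.translate(translator).lower()
--
--     # Split into words
--     words = clean_text.split()
--
--     # Count word frequencies
--     word_count = Counter(words)
--
--     # Top 3 most frequent words
--     top_words = word_count.most_common(3)
--
--     # Words appearing only once
--     single_occurrence_words = [word for word, count in word_count.items() if count == 1]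
--
--     return top_words, single_occurrence_words
-- ===== SOURCE B (Python) =====
-- import string
--
-- def analyze_word_frequency(text):
--     punct = set(string.punctuation)
--     cleaned = "".join(c.lower() for c in text if c not in punct)
--     counts = {}
--     for w in cleaned.split():
--         counts[w] = counts.get(w, 0) + 1
--     items = list(counts.items())
--     top_words = []
--     remaining = list(items)
--     for _ in range(3):
--         best = None
--         for kv in remaining:
--             if best is None or kv[1] > best[1]:
--                 best = kv
--         if best is None:
--             break
--         top_words.append(best)
--         remaining.remove(best)
--     single_occurrence_words = [w for w, c in items if c == 1]
--     return top_words, single_occurrence_words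
-- ===== Notes on version B (the rewrite author's own statement) =====
-- stated objective: alternative
-- what changed: Counter + most_common(3) is replaced by a plain dict-counting loop and an explicit 3-round selection (scan for the first maximum, remove it) instead of Counter's heap/sort-based most_common; cleaning is a per-character comprehension instead of str.translate.
import Mathlib
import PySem

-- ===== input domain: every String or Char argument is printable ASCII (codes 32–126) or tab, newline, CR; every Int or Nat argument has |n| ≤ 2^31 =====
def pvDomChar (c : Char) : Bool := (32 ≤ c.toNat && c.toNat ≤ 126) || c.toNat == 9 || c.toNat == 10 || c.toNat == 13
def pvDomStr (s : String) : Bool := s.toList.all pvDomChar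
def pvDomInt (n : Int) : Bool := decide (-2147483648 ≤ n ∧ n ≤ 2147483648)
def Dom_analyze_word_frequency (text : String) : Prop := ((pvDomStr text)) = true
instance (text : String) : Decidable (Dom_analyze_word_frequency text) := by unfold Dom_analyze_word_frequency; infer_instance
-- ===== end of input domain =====

-- B replaces Counter + most_common(3) by a dict-counting loop and a 3-round first-max selection (alternative algorithm, same results).

-- ===== PORT A =====
-- string.punctuation
def pvPunct : List Char := "!\"#$%&'()*+,-./:;<=>?@[\\]^_`{|}~".toList

def analyze_word_frequency (text : String) : (List (String × Int)) × List String :=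
  -- clean_text = text.translate(remove punctuation).lower()
  let clean_text := PySem.Str.lower (String.ofList (text.toList.filter (fun c => !(pvPunct.contains c))))
  let words := PySem.Str.split₀ clean_text
  let word_count := PySem.Dict.counter words
  -- most_common(3) = heapq.nlargest(3, items, key=count) = stable descending sort by count, first 3
  let top_words := (PySem.List.sorted word_count.items (fun kv => kv.2) true).take 3
  let single := (word_count.items.filter (fun kv => kv.2 == 1)).map (·.1)
  (top_words, single)

-- ===== PORT B =====
-- best = None; for kv in remaining: if best is None or kv[1] > best[1]: best = kv
def pvScanBest (remaining : List (String × Int)) : Option (String × Int) :=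
  remaining.foldl
    (fun best kv => match best with
      | none => some kv
      | some b => if b.2 < kv.2 then some kv else some b) none

-- for _ in range(3): scan for best, append, remaining.remove(best)  (best ∈ remaining, so remove = erase first occurrence)
def pvSelectTop : Nat → List (String × Int) → List (String × Int)
  | 0, _ => []
  | n+1, remaining =>
    match pvScanBest remaining with
    | none => []
    | some b => b :: pvSelectTop n (remaining.erase b)

def analyze_word_frequency_alt (text : String) : (List (String × Int)) × List String :=
  -- cleaned = "".join(c.lower() for c in text if c not in punct)
  let cleaned := String.ofList ((text.toList.filter (fun c => !(pvPunct.contains c))).map PySem.Chars.lowerChar)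
  -- counts = {}; for w in cleaned.split(): counts[w] = counts.get(w, 0) + 1
  let counts := (PySem.Str.split₀ cleaned).foldl
      (fun d w => d.insert w (d.getD w 0 + 1)) PySem.Dict.empty
  let items := counts.items
  (pvSelectTop 3 items, (items.filter (fun kv => kv.2 == 1)).map (·.1))

-- ===== PRECONDITION & SPEC =====
def Spec_analyze_word_frequency (text : String) (out : (List (String × Int)) × List String) : Prop := out = analyze_word_frequency_alt text
instance (text : String) (out : (List (String × Int)) × List String) : Decidable (Spec_analyze_word_frequency text out) := by unfold Spec_analyze_word_frequency; infer_instance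

-- ===== CLAIM (what is proved, stated in full; the proofs are below) =====
def Claim_equal_analyze_word_frequency : Prop := ∀ (text : String), Dom_analyze_word_frequency text → Spec_analyze_word_frequency text (analyze_word_frequency text)

-- ===== LEMMAS AND PROOFS =====

-- scanBest characterization: foldl from `some b0` yields the first running maximum.
theorem pvScanAux_spec (l : List (String × Int)) (b0 : String × Int) :
    ∃ b, l.foldl (fun best kv => match best with
          | none => some kv
          | some b => if b.2 < kv.2 then some kv else some b) (some b0) = some b ∧
      ((b = b0 ∧ ∀ y ∈ l, y.2 ≤ b0.2) ∨
       (b0.2 < b.2 ∧ ∃ l1 l2, l = l1 ++ b :: l2 ∧ (∀ y ∈ l1, y.2 < b.2) ∧ (∀ y ∈ l2, y.2 ≤ b.2))) := by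
  induction l generalizing b0 with
  | nil => exact ⟨b0, rfl, Or.inl ⟨rfl, by simp⟩⟩
  | cons x xs ih =>
    by_cases hx : b0.2 < x.2
    · obtain ⟨b, hb, hcase⟩ := ih x
      refine ⟨b, by simpa [hx] using hb, Or.inr ?_⟩
      rcases hcase with ⟨rfl, hall⟩ | ⟨hlt, l1, l2, hxs, h1, h2⟩
      · exact ⟨hx, [], xs, rfl, by simp, hall⟩
      · refine ⟨lt_trans hx hlt, x :: l1, l2, by rw [hxs]; rfl, ?_, h2⟩
        intro y hy
        rcases List.mem_cons.mp hy with rfl | hy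
        · exact hlt
        · exact h1 y hy
    · obtain ⟨b, hb, hcase⟩ := ih b0
      refine ⟨b, by simpa [hx] using hb, ?_⟩
      rcases hcase with ⟨rfl, hall⟩ | ⟨hlt, l1, l2, hxs, h1, h2⟩
      · refine Or.inl ⟨rfl, ?_⟩
        intro y hy
        rcases List.mem_cons.mp hy with rfl | hy
        · exact not_lt.mp hx
        · exact hall y hy
      · refine Or.inr ⟨hlt, x :: l1, l2, by rw [hxs]; rfl, ?_, h2⟩
        intro y hy
        rcases List.mem_cons.mp hy with rfl | hy
        · exact lt_of_le_of_lt (not_lt.mp hx) hlt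
        · exact h1 y hy

theorem pvScanBest_cons (x : String × Int) (xs : List (String × Int)) :
    ∃ b, pvScanBest (x :: xs) = some b ∧
      ∃ l1 l2, x :: xs = l1 ++ b :: l2 ∧ (∀ y ∈ l1, y.2 < b.2) ∧ (∀ y ∈ l2, y.2 ≤ b.2) := by
  obtain ⟨b, hb, hcase⟩ := pvScanAux_spec xs x
  refine ⟨b, hb, ?_⟩
  rcases hcase with ⟨rfl, hall⟩ | ⟨hlt, l1, l2, hxs, h1, h2⟩
  · exact ⟨[], xs, rfl, by simp, hall⟩
  · refine ⟨x :: l1, l2, by rw [hxs]; rfl, ?_, h2⟩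
    intro y hy
    rcases List.mem_cons.mp hy with rfl | hy
    · exact hlt
    · exact h1 y hy

-- inserting an element whose key exceeds everything in the list puts it in front
theorem pv_insertBy_front (b : String × Int) (s : List (String × Int))
    (h : ∀ y ∈ s, y.2 < b.2) :
    PySem.List.insertBy (fun a c => decide ((c : String × Int).2 < a.2)) b s = b :: s := by
  cases s with
  | nil => rfl
  | cons y t =>
    have : y.2 < b.2 := h y (by simp)
    simp [PySem.List.insertBy, this]

-- folding elements with keys ≤ b's over `b :: acc` leaves b in front
theorem pv_foldl_ins_cons (l : List (String × Int)) (b : String × Int)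
    (h : ∀ y ∈ l, y.2 ≤ b.2) :
    ∀ acc, l.foldl (fun acc x => PySem.List.insertBy (fun a c => decide ((c : String × Int).2 < a.2)) x acc) (b :: acc)
      = b :: l.foldl (fun acc x => PySem.List.insertBy (fun a c => decide ((c : String × Int).2 < a.2)) x acc) acc := by
  induction l with
  | nil => intro acc; rfl
  | cons x xs ih =>
    intro acc
    have hx : ¬ b.2 < x.2 := not_lt.mpr (h x (by simp))
    have step : PySem.List.insertBy (fun a c => decide ((c : String × Int).2 < a.2)) x (b :: acc)
        = b :: PySem.List.insertBy (fun a c => decide ((c : String × Int).2 < a.2)) x acc := by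
      simp [PySem.List.insertBy, hx]
    simp only [List.foldl_cons, step]
    exact ih (fun y hy => h y (by simp [hy])) _

-- head of the stable descending sort: the first maximal element comes out first
theorem pv_sorted_head (l1 l2 : List (String × Int)) (b : String × Int)
    (h1 : ∀ y ∈ l1, y.2 < b.2) (h2 : ∀ y ∈ l2, y.2 ≤ b.2) :
    PySem.List.sorted (l1 ++ b :: l2) (fun kv => kv.2) true
      = b :: PySem.List.sorted (l1 ++ l2) (fun kv => kv.2) true := by
  rw [PySem.List.sorted_rev_eq_foldl_insertBy, PySem.List.sorted_rev_eq_foldl_insertBy]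
  rw [List.foldl_append, List.foldl_cons, List.foldl_append]
  have hmem : ∀ y ∈ l1.foldl (fun acc x => PySem.List.insertBy (fun a c => decide ((c : String × Int).2 < a.2)) x acc) [], y.2 < b.2 := by
    intro y hy
    apply h1
    have := (PySem.List.mem_sorted (xs := l1) (key := fun kv : String × Int => kv.2) (rev := true) (x := y)).mp
    rw [PySem.List.sorted_rev_eq_foldl_insertBy] at this
    exact this hy
  rw [pv_insertBy_front b _ hmem, pv_foldl_ins_cons l2 b h2]

-- the n-round selection equals take-of-sort, generally
theorem pv_select_eq_sorted_take (n : Nat) :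
    ∀ l : List (String × Int),
      pvSelectTop n l = (PySem.List.sorted l (fun kv => kv.2) true).take n := by
  induction n with
  | zero => intro l; simp [pvSelectTop]
  | succ n ih =>
    intro l
    cases l with
    | nil => simp [pvSelectTop, pvScanBest, PySem.List.sorted]
    | cons x xs =>
      obtain ⟨b, hb, l1, l2, hdec, h1, h2⟩ := pvScanBest_cons x xs
      have hback : b ∉ l1 := fun hmem => lt_irrefl b.2 (h1 b hmem)
      have herase : (x :: xs).erase b = l1 ++ l2 := by
        rw [hdec, List.erase_append_right _ (by simpa using hback), List.erase_cons_head]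
      simp only [pvSelectTop, hb]
      rw [herase, hdec, pv_sorted_head l1 l2 b h1 h2, List.take_succ_cons, ih]

-- ===== VERDICT (by name: the statement is the Claim_ definition above) =====
theorem analyze_word_frequency_spec : Claim_equal_analyze_word_frequency := by
  intro text _
  unfold Spec_analyze_word_frequency
  simp only [analyze_word_frequency, analyze_word_frequency_alt]
  have hclean : PySem.Str.lower (String.ofList (text.toList.filter (fun c => !(pvPunct.contains c))))
      = String.ofList ((text.toList.filter (fun c => !(pvPunct.contains c))).map PySem.Chars.lowerChar) := by
    simp [PySem.Str.lower, PySem.Chars.lower]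
  have hcount : ∀ words : List String,
      PySem.Dict.counter words
        = words.foldl (fun d w => d.insert w (d.getD w 0 + 1)) PySem.Dict.empty := fun _ => rfl
  rw [hclean, hcount, pv_select_eq_sorted_take]
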